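-- pv_equiv track=rewrite | github.com/fedotiuk-dm/aksi-app-java-spring-nextjs_1.0 | fix_magic_numbers.py | derive_constant_name
-- ===== SOURCE A (Python) =====
-- def derive_constant_name(line, number):
--     """
--     Виводить ім'я константи на основі контексту рядка.
--     Наприклад, якщо рядок містить 'timeout' і число 1000, ім'я буде TIMEOUT_MILLISECONDS.
--     """
--     # Набір загальних контекстів для чисел
--     contexts = {
--         'timeout': 'TIMEOUT',
--         'delay': 'DELAY',
--         'size': 'SIZE',
--         'length': 'LENGTH',
--         'count': 'COUNT',
--         'limit': 'LIMIT',
--         'max': 'MAX',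
--         'min': 'MIN',
--         'port': 'PORT',
--     }
--
--     line = line.lower()
--
--     # Шукаємо контекст у рядку
--     for context_keyword, constant_prefix in contexts.items():
--         if context_keyword in line:
--             if 'millisecond' in line or 'ms' in line:
--                 return f"{constant_prefix}_MILLISECONDS"
--             elif 'second' in line or 'sec' in line:
--                 return f"{constant_prefix}_SECONDS"
--             elif 'minute' in line or 'min' in line:
--                 return f"{constant_prefix}_MINUTES"
--             elif 'hour' in line or 'hr' in line:
--                 return f"{constant_prefix}_HOURS"
--             elif 'day' in line:
--                 return f"{constant_prefix}_DAYS"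
--             else:
--                 return constant_prefix
--
--     # Якщо контекст не знайдено, використовуємо значення числа у назві
--     return f"CONSTANT_{number}"
-- ===== SOURCE B (Python) =====
-- # Flat alphabetically-ordered rule table scanned once with two min-priority
-- # accumulators (no early exit, order-independent) instead of A's nested
-- # first-match loop with a repeated unit if-elif chain.
-- RULES = [
--     # (keyword, is_context, priority, value) -- alphabetical by keyword;
--     # priority encodes A's precedence, so the list order is irrelevant.
--     ('count', True, 4, 'COUNT'),
--     ('day', False, 4, '_DAYS'),
--     ('delay', True, 1, 'DELAY'),
--     ('hour', False, 3, '_HOURS'),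
--     ('hr', False, 3, '_HOURS'),
--     ('length', True, 3, 'LENGTH'),
--     ('limit', True, 5, 'LIMIT'),
--     ('max', True, 6, 'MAX'),
--     ('millisecond', False, 0, '_MILLISECONDS'),
--     ('min', True, 7, 'MIN'),
--     ('min', False, 2, '_MINUTES'),
--     ('minute', False, 2, '_MINUTES'),
--     ('ms', False, 0, '_MILLISECONDS'),
--     ('port', True, 8, 'PORT'),
--     ('sec', False, 1, '_SECONDS'),
--     ('second', False, 1, '_SECONDS'),
--     ('size', True, 2, 'SIZE'),
--     ('timeout', True, 0, 'TIMEOUT'),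
-- ]
--
--
-- def derive_constant_name(line, number):
--     """Single pass over a flat rule table, keeping the minimum-priority
--     context match and the minimum-priority unit match; concatenate at the end."""
--     low = line.lower()
--     best_ctx = (9, None)
--     best_unit = (5, '')
--     for kw, is_ctx, pr, val in RULES:
--         if kw in low:
--             if is_ctx:
--                 if pr < best_ctx[0]:
--                     best_ctx = (pr, val)
--             elif pr < best_unit[0]:
--                 best_unit = (pr, val)
--     if best_ctx[1] is None:
--         return f"CONSTANT_{number}"
--     return best_ctx[1] + best_unit[1]
-- ===== Notes on version B (the rewrite author's own statement) =====
-- stated objective: alternative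
-- what changed: Replaces A's nested first-match control flow (ordered context loop whose body repeats a five-way unit if-elif chain) by a single pass over one flat, alphabetically ordered rule table that keeps two minimum-priority accumulators (best context, best unit) and concatenates them at the end; the table's order is irrelevant to the result.
import Mathlib
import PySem

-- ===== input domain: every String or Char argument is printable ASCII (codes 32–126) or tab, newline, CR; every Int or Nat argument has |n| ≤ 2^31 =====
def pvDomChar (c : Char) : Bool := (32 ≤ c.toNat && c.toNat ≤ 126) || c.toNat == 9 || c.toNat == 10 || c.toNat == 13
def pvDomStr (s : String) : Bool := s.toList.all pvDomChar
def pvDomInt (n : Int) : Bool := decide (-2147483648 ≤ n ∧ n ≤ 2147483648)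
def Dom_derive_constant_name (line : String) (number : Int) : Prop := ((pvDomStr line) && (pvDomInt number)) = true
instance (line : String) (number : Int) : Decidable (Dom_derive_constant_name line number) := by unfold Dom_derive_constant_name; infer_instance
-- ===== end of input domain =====

-- B replaces A's nested context-loop-with-repeated-unit-chain by one pass over a flat
-- alphabetical rule table keeping two min-priority accumulators; objective: alternative.


-- ===== PORT A =====
-- the dict literal 'contexts', in insertion order
def pvContextsA : List (String × String) :=
  [("timeout", "TIMEOUT"), ("delay", "DELAY"), ("size", "SIZE"), ("length", "LENGTH"),
   ("count", "COUNT"), ("limit", "LIMIT"), ("max", "MAX"), ("min", "MIN"), ("port", "PORT")]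

-- the 'for context_keyword, constant_prefix in contexts.items():' loop with its early returns
def pvLoopA (low : String) (number : Int) : List (String × String) → String
  | [] => "CONSTANT_" ++ PySem.Int.toStr number
  | (k, p) :: rest =>
    if PySem.Str.isIn k low then
      if PySem.Str.isIn "millisecond" low || PySem.Str.isIn "ms" low then p ++ "_MILLISECONDS"
      else if PySem.Str.isIn "second" low || PySem.Str.isIn "sec" low then p ++ "_SECONDS"
      else if PySem.Str.isIn "minute" low || PySem.Str.isIn "min" low then p ++ "_MINUTES"
      else if PySem.Str.isIn "hour" low || PySem.Str.isIn "hr" low then p ++ "_HOURS"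
      else if PySem.Str.isIn "day" low then p ++ "_DAYS"
      else p
    else pvLoopA low number rest

def derive_constant_name (line : String) (number : Int) : String :=
  pvLoopA (PySem.Str.lower line) number pvContextsA

-- ===== PORT B =====
-- the flat 'RULES' table: (keyword, is_context, priority, value), alphabetical by keyword
def pvRulesB : List (String × Bool × Nat × String) :=
  [("count", true, 4, "COUNT"), ("day", false, 4, "_DAYS"), ("delay", true, 1, "DELAY"),
   ("hour", false, 3, "_HOURS"), ("hr", false, 3, "_HOURS"), ("length", true, 3, "LENGTH"),
   ("limit", true, 5, "LIMIT"), ("max", true, 6, "MAX"), ("millisecond", false, 0, "_MILLISECONDS"),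
   ("min", true, 7, "MIN"), ("min", false, 2, "_MINUTES"), ("minute", false, 2, "_MINUTES"),
   ("ms", false, 0, "_MILLISECONDS"), ("port", true, 8, "PORT"), ("sec", false, 1, "_SECONDS"),
   ("second", false, 1, "_SECONDS"), ("size", true, 2, "SIZE"), ("timeout", true, 0, "TIMEOUT")]

-- one iteration of B's 'for kw, is_ctx, pr, val in RULES' loop; state = (best_ctx, best_unit)
def pvStepB (low : String) (s : (Nat × Option String) × (Nat × String))
    (r : String × Bool × Nat × String) : (Nat × Option String) × (Nat × String) :=
  if PySem.Str.isIn r.1 low then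
    if r.2.1 then
      (if r.2.2.1 < s.1.1 then (r.2.2.1, some r.2.2.2) else s.1, s.2)
    else
      (s.1, if r.2.2.1 < s.2.1 then (r.2.2.1, r.2.2.2) else s.2)
  else s

def derive_constant_name_alt (line : String) (number : Int) : String :=
  let low := PySem.Str.lower line
  let best := pvRulesB.foldl (pvStepB low) ((9, none), (5, ""))
  match best.1.2 with
  | none => "CONSTANT_" ++ PySem.Int.toStr number
  | some p => p ++ best.2.2

-- ===== PRECONDITION & SPEC =====
def Spec_derive_constant_name (line : String) (number : Int) (out : String) : Prop := out = derive_constant_name_alt line number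
instance (line : String) (number : Int) (out : String) : Decidable (Spec_derive_constant_name line number out) := by unfold Spec_derive_constant_name; infer_instance

-- ===== CLAIM (what is proved, stated in full; the proofs are below) =====
def Claim_equal_derive_constant_name : Prop := ∀ (line : String) (number : Int), Dom_derive_constant_name line number → Spec_derive_constant_name line number (derive_constant_name line number)

-- ===== LEMMAS AND PROOFS =====

-- first-match context of A's ordered dict, written as an explicit if-chain
def pvFirstCtx (low : String) : Option String :=
  if PySem.Str.isIn "timeout" low then some "TIMEOUT"
  else if PySem.Str.isIn "delay" low then some "DELAY"
  else if PySem.Str.isIn "size" low then some "SIZE"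
  else if PySem.Str.isIn "length" low then some "LENGTH"
  else if PySem.Str.isIn "count" low then some "COUNT"
  else if PySem.Str.isIn "limit" low then some "LIMIT"
  else if PySem.Str.isIn "max" low then some "MAX"
  else if PySem.Str.isIn "min" low then some "MIN"
  else if PySem.Str.isIn "port" low then some "PORT"
  else none

-- A's unit-suffix chain without the prefix
def pvUnitSuffix (low : String) : String :=
  if PySem.Str.isIn "millisecond" low || PySem.Str.isIn "ms" low then "_MILLISECONDS"
  else if PySem.Str.isIn "second" low || PySem.Str.isIn "sec" low then "_SECONDS"
  else if PySem.Str.isIn "minute" low || PySem.Str.isIn "min" low then "_MINUTES"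
  else if PySem.Str.isIn "hour" low || PySem.Str.isIn "hr" low then "_HOURS"
  else if PySem.Str.isIn "day" low then "_DAYS"
  else ""

-- the two independent components of pvStepB
def pvStepCtx (low : String) (s : Nat × Option String) (r : String × Bool × Nat × String) :
    Nat × Option String :=
  if PySem.Str.isIn r.1 low then
    if r.2.1 then (if r.2.2.1 < s.1 then (r.2.2.1, some r.2.2.2) else s) else s
  else s

def pvStepUnit (low : String) (s : Nat × String) (r : String × Bool × Nat × String) :
    Nat × String :=
  if PySem.Str.isIn r.1 low then
    if r.2.1 then s else (if r.2.2.1 < s.1 then (r.2.2.1, r.2.2.2) else s)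
  else s

-- the same steps with the membership test precomputed as a Bool
def pvStepCtxG (s : Nat × Option String) (r : Bool × Bool × Nat × String) : Nat × Option String :=
  if r.1 then
    if r.2.1 then (if r.2.2.1 < s.1 then (r.2.2.1, some r.2.2.2) else s) else s
  else s

def pvStepUnitG (s : Nat × String) (r : Bool × Bool × Nat × String) : Nat × String :=
  if r.1 then
    if r.2.1 then s else (if r.2.2.1 < s.1 then (r.2.2.1, r.2.2.2) else s)
  else s

theorem pvStepB_split (low : String) (s : (Nat × Option String) × (Nat × String))
    (r : String × Bool × Nat × String) :
    pvStepB low s r = (pvStepCtx low s.1 r, pvStepUnit low s.2 r) := by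
  simp only [pvStepB, pvStepCtx, pvStepUnit]
  split_ifs <;> rfl

theorem pvFold_split (low : String) (rules : List (String × Bool × Nat × String))
    (s : (Nat × Option String) × (Nat × String)) :
    rules.foldl (pvStepB low) s
      = (rules.foldl (pvStepCtx low) s.1, rules.foldl (pvStepUnit low) s.2) := by
  induction rules generalizing s with
  | nil => rfl
  | cons r rest ih => simp only [List.foldl, pvStepB_split]; exact ih _

theorem pvStepCtxG_unit (s : Nat × Option String) (b : Bool) (pr : Nat) (v : String) :
    pvStepCtxG s (b, false, pr, v) = s := by
  cases b <;> simp [pvStepCtxG]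

theorem pvStepUnitG_ctx (s : Nat × String) (b : Bool) (pr : Nat) (v : String) :
    pvStepUnitG s (b, true, pr, v) = s := by
  cases b <;> simp [pvStepUnitG]

-- the context component of B's fold computes A's first matching context
theorem pvCtx_char (low : String) :
    (pvRulesB.foldl (pvStepCtx low) (9, none)).2 = pvFirstCtx low := by
  have h : pvRulesB.foldl (pvStepCtx low) (9, none)
      = (pvRulesB.map (fun r => (PySem.Str.isIn r.1 low, r.2))).foldl pvStepCtxG (9, none) := by
    rw [List.foldl_map]; rfl
  rw [h]
  simp only [pvRulesB, List.map, pvFirstCtx]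
  generalize PySem.Str.isIn "timeout" low = b1
  generalize PySem.Str.isIn "delay" low = b2
  generalize PySem.Str.isIn "size" low = b3
  generalize PySem.Str.isIn "length" low = b4
  generalize PySem.Str.isIn "count" low = b5
  generalize PySem.Str.isIn "limit" low = b6
  generalize PySem.Str.isIn "max" low = b7
  generalize PySem.Str.isIn "min" low = b8
  generalize PySem.Str.isIn "port" low = b9
  generalize PySem.Str.isIn "millisecond" low = u1
  generalize PySem.Str.isIn "ms" low = u2
  generalize PySem.Str.isIn "second" low = u3
  generalize PySem.Str.isIn "sec" low = u4
  generalize PySem.Str.isIn "minute" low = u5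
  generalize PySem.Str.isIn "hour" low = u6
  generalize PySem.Str.isIn "hr" low = u7
  generalize PySem.Str.isIn "day" low = u8
  simp only [List.foldl, pvStepCtxG_unit]
  revert b1 b2 b3 b4 b5 b6 b7 b8 b9
  decide

-- the unit component of B's fold computes A's if-elif unit suffix
theorem pvUnit_char (low : String) :
    (pvRulesB.foldl (pvStepUnit low) (5, "")).2 = pvUnitSuffix low := by
  have h : pvRulesB.foldl (pvStepUnit low) (5, "")
      = (pvRulesB.map (fun r => (PySem.Str.isIn r.1 low, r.2))).foldl pvStepUnitG (5, "") := by
    rw [List.foldl_map]; rfl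
  rw [h]
  simp only [pvRulesB, List.map, pvUnitSuffix]
  generalize PySem.Str.isIn "timeout" low = b1
  generalize PySem.Str.isIn "delay" low = b2
  generalize PySem.Str.isIn "size" low = b3
  generalize PySem.Str.isIn "length" low = b4
  generalize PySem.Str.isIn "count" low = b5
  generalize PySem.Str.isIn "limit" low = b6
  generalize PySem.Str.isIn "max" low = b7
  generalize PySem.Str.isIn "min" low = b8
  generalize PySem.Str.isIn "port" low = b9
  generalize PySem.Str.isIn "millisecond" low = u1
  generalize PySem.Str.isIn "ms" low = u2
  generalize PySem.Str.isIn "second" low = u3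
  generalize PySem.Str.isIn "sec" low = u4
  generalize PySem.Str.isIn "minute" low = u5
  generalize PySem.Str.isIn "hour" low = u6
  generalize PySem.Str.isIn "hr" low = u7
  generalize PySem.Str.isIn "day" low = u8
  simp only [List.foldl, pvStepUnitG_ctx]
  revert b8 u1 u2 u3 u4 u5 u6 u7 u8
  decide

-- A's inner if-elif chain is the prefix appended to pvUnitSuffix
theorem pvSuffix_eq (p low : String) :
    (if PySem.Str.isIn "millisecond" low || PySem.Str.isIn "ms" low then p ++ "_MILLISECONDS"
     else if PySem.Str.isIn "second" low || PySem.Str.isIn "sec" low then p ++ "_SECONDS"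
     else if PySem.Str.isIn "minute" low || PySem.Str.isIn "min" low then p ++ "_MINUTES"
     else if PySem.Str.isIn "hour" low || PySem.Str.isIn "hr" low then p ++ "_HOURS"
     else if PySem.Str.isIn "day" low then p ++ "_DAYS"
     else p)
    = p ++ pvUnitSuffix low := by
  simp only [pvUnitSuffix, apply_ite (p ++ ·)]
  split_ifs <;> simp

-- A's loop over its ordered dict equals first-match-then-suffix
theorem pvLoop_eq (low : String) (number : Int) :
    pvLoopA low number pvContextsA
    = match pvFirstCtx low with
      | none => "CONSTANT_" ++ PySem.Int.toStr number
      | some p => p ++ pvUnitSuffix low := by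
  simp only [pvContextsA, pvLoopA, pvFirstCtx, pvSuffix_eq]
  split_ifs <;> rfl

-- ===== VERDICT (by name: the statement is the Claim_ definition above) =====
theorem derive_constant_name_spec : Claim_equal_derive_constant_name := by
  intro line number _
  unfold Spec_derive_constant_name derive_constant_name derive_constant_name_alt
  simp only [pvLoop_eq, pvFold_split, pvCtx_char, pvUnit_char]
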